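-- pv_equiv track=rewrite | github.com/pythonstrup/Algorithm-Problem-Solving | Programmers-level2/더맵게.py | solution
-- ===== SOURCE A (Python) =====
-- import heapq
--
-- def solution(scoville, k):
--     answer = 0
--
--     heap = []
--     for i in scoville:
--         heapq.heappush(heap, i)
--
--     while heap[0] < k:
--         if len(heap) > 1:
--             heapq.heappush(heap, heapq.heappop(heap) + (heapq.heappop(heap)*2))
--             answer += 1
--         else:
--             return -1
--
--     return answer
-- ===== SOURCE B (Python) =====
-- def solution(scoville, k):
--     pot = list(scoville)
--     answer = 0
--     while min(pot) < k:
--         if len(pot) < 2: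
--             return -1
--         a = min(pot)
--         pot.remove(a)
--         b = min(pot)
--         pot.remove(b)
--         pot.append(a + 2 * b)
--         answer += 1
--     return answer
-- ===== Notes on version B (the rewrite author's own statement) =====
-- stated objective: alternative
-- what changed: Drops the priority queue entirely: instead of heapifying and maintaining a heap invariant, B keeps the pot as a plain unordered list and each round locates the two smallest values by linear min-scans (min + remove), appending the mix at the end; correctness relies on the greedy result depending only on the multiset of values.
import Mathlib
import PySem

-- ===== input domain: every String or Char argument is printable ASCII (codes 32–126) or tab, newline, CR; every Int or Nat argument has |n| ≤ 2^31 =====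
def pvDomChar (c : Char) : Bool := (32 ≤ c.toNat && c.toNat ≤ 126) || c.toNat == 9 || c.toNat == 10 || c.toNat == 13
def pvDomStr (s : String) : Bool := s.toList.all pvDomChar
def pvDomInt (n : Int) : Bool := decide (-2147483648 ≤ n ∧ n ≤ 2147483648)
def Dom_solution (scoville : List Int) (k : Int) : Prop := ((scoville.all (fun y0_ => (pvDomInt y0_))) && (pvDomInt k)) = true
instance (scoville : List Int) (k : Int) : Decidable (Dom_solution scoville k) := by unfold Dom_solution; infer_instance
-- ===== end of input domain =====

-- B drops the priority queue entirely: it keeps the pot as a plain unordered list and each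
-- round locates the two smallest values by linear min-scans (min + remove), appending the
-- mix at the end; objective: alternative (selection by scanning vs a heap), not faster.
-- Loops are written with a Nat fuel guard (a totality device only: each call site passes
-- enough fuel, proved where used; the guard never fires on admitted inputs).

-- ===== PORT A =====
-- CPython heapq._siftdown(heap, startpos, pos) with newitem = heap[pos] passed explicitly
-- (the slot at pos is write-only in CPython's loop); exact step-for-step port.
-- fuel ≥ pos at every call, so the fuel-0 branch coincides with the loop's exit.
def siftdownAux (fuel : Nat) (heap : List Int) (startpos pos : Nat) (newitem : Int) : List Int :=
  match fuel with
  | 0 => heap.set pos newitem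
  | fuel + 1 =>
    if startpos < pos then
      let parentpos := (pos - 1) / 2
      let parentv := heap.getD parentpos 0
      if newitem < parentv then
        siftdownAux fuel (heap.set pos parentv) startpos parentpos newitem
      else
        heap.set pos newitem
    else
      heap.set pos newitem

-- heapq.heappush: append then sift down towards the root
def heappush (heap : List Int) (item : Int) : List Int :=
  siftdownAux heap.length (heap ++ [item]) 0 heap.length item

-- the while-loop of CPython heapq._siftup (move the hole to a leaf, following the smaller
-- child); fuel ≥ endpos - childpos at every call, so fuel 0 coincides with the loop's exit
def siftupLoop (fuel : Nat) (heap : List Int) (pos childpos endpos : Nat) : List Int × Nat :=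
  match fuel with
  | 0 => (heap, pos)
  | fuel + 1 =>
    if childpos < endpos then
      let childpos' := if childpos + 1 < endpos ∧ ¬ (heap.getD childpos 0 < heap.getD (childpos + 1) 0)
                       then childpos + 1 else childpos
      siftupLoop fuel (heap.set pos (heap.getD childpos' 0)) childpos' (2 * childpos' + 1) endpos
    else
      (heap, pos)

-- heapq._siftup(heap, pos): loop, then place newitem and _siftdown back up
def siftup (heap : List Int) (pos : Nat) : List Int :=
  let r := siftupLoop heap.length heap pos (2 * pos + 1) heap.length
  siftdownAux r.2 r.1 pos r.2 (heap.getD pos 0)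

-- heapq.heappop; on the empty heap Python raises IndexError (unreachable under Pre_), junk (0, [])
def heappop (heap : List Int) : Int × List Int :=
  match heap.getLast? with
  | none => (0, [])
  | some lastelt =>
    let rest := heap.dropLast
    if rest.isEmpty then (lastelt, [])
    else (rest.getD 0 0, siftup (rest.set 0 lastelt) 0)

-- the while-loop of A; heap[0] on the empty heap raises in Python (unreachable under Pre_).
-- Each iteration shrinks the heap by one element, so fuel = initial length suffices.
def loopA (fuel : Nat) (heap : List Int) (k : Int) (answer : Int) : Int :=
  match fuel with
  | 0 => answer
  | fuel + 1 =>
    if heap.getD 0 0 < k then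
      if 1 < heap.length then
        let p1 := heappop heap
        let p2 := heappop p1.2
        loopA fuel (heappush p2.2 (p1.1 + p2.1 * 2)) k (answer + 1)
      else
        -1
    else
      answer

def solution (scoville : List Int) (k : Int) : Int :=
  let heap := scoville.foldl (fun h i => heappush h i) []
  loopA heap.length heap k 0

-- ===== PORT B =====
-- the while-loop of Source B: min(pot) is a linear scan (List.min?: min([]) raises ValueError in
-- Python, unreachable under Pre_, junk 0); pot.remove(v) removes the first occurrence of v,
-- exactly List.erase (v is always a member here, so remove never raises); the mix is appended.
-- Each iteration shrinks the pot by one element, so fuel = initial length suffices.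
def loopScan (fuel : Nat) (pot : List Int) (k : Int) (answer : Int) : Int :=
  match fuel with
  | 0 => 0
  | fuel + 1 =>
    match pot.min? with
    | none => 0
    | some a =>
      if a < k then
        if pot.length < 2 then
          -1
        else
          let rest := pot.erase a
          match rest.min? with
          | none => -1  -- unreachable: rest has pot.length - 1 ≥ 1 elements
          | some b => loopScan fuel (rest.erase b ++ [a + 2 * b]) k (answer + 1)
      else
        answer

def solution_alt (scoville : List Int) (k : Int) : Int :=
  loopScan scoville.length scoville k 0

-- ===== PRECONDITION & SPEC =====
-- Pre_ excludes only the empty list, on which A raises IndexError at heap[0]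
-- (and B raises ValueError at min([])).
def Pre_solution (scoville : List Int) (k : Int) : Prop := scoville ≠ []
instance (scoville : List Int) (k : Int) : Decidable (Pre_solution scoville k) := by
  unfold Pre_solution; infer_instance

def pvWitness_solution : List Int × Int := ([1, 2, 3, 9, 10, 12], 7)

def Spec_solution (scoville : List Int) (k : Int) (out : Int) : Prop := out = solution_alt scoville k
instance (scoville : List Int) (k : Int) (out : Int) : Decidable (Spec_solution scoville k out) := by
  unfold Spec_solution; infer_instance

-- ===== CLAIM (what is proved, stated in full; the proofs are below) =====
def Claim_equal_solution : Prop := ∀ (scoville : List Int) (k : Int), Dom_solution scoville k → Pre_solution scoville k → Spec_solution scoville k (solution scoville k)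

-- ===== LEMMAS AND PROOFS =====

theorem siftdownAux_length (fuel : Nat) (heap : List Int) (startpos pos : Nat) (newitem : Int) :
    (siftdownAux fuel heap startpos pos newitem).length = heap.length := by
  fun_induction siftdownAux <;> simp_all

theorem siftupLoop_length (fuel : Nat) (heap : List Int) (pos childpos endpos : Nat) :
    (siftupLoop fuel heap pos childpos endpos).1.length = heap.length := by
  fun_induction siftupLoop <;> simp_all

theorem heappush_length (heap : List Int) (item : Int) :
    (heappush heap item).length = heap.length + 1 := by
  simp [heappush, siftdownAux_length]

-- the binary-heap invariant of heapq: every non-root slot is ≥ its parent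
def HeapInv (h : List Int) : Prop :=
  ∀ i, 0 < i → i < h.length → h.getD ((i - 1) / 2) 0 ≤ h.getD i 0

theorem getD_set_self {l : List Int} {i : Nat} (hi : i < l.length) (x : Int) :
    (l.set i x).getD i 0 = x := by
  simp [List.getD_eq_getElem?_getD, hi]

theorem getD_set_ne {l : List Int} {i j : Nat} (hij : i ≠ j) (x : Int) :
    (l.set i x).getD j 0 = l.getD j 0 := by
  simp [List.getD_eq_getElem?_getD, List.getElem?_set, hij]

theorem set_getD_self {l : List Int} {i : Nat} (hi : i < l.length) :
    l.set i (l.getD i 0) = l := by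
  have : l.getD i 0 = l[i] := by simp [List.getD_eq_getElem?_getD, List.getElem?_eq_getElem hi]
  rw [this, List.set_getElem_self]

theorem count_set (l : List Int) (i : Nat) (x y : Int) (hi : i < l.length) :
    (l.set i x).count y + (if y = l.getD i 0 then 1 else 0)
      = l.count y + (if y = x then 1 else 0) := by
  induction l generalizing i with
  | nil => simp at hi
  | cons a t ih =>
    cases i with
    | zero =>
      simp only [List.set_cons_zero, List.count_cons, List.getD_cons_zero, beq_iff_eq]
      split_ifs <;> omega
    | succ n =>
      simp only [List.set_cons_succ, List.count_cons, List.getD_cons_succ, beq_iff_eq]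
      have hrec := ih n (by simpa using hi)
      split_ifs at hrec ⊢ <;> omega

theorem perm_set_swap (l : List Int) (i j : Nat) (hi : i < l.length) (hj : j < l.length) :
    ((l.set i (l.getD j 0)).set j (l.getD i 0)).Perm l := by
  rcases eq_or_ne i j with rfl | hij
  · rw [List.set_set, set_getD_self hi]
  · rw [List.perm_iff_count]
    intro y
    have h1 := count_set l i (l.getD j 0) y hi
    have h2 := count_set (l.set i (l.getD j 0)) j (l.getD i 0) y (by simpa using hj)
    rw [getD_set_ne hij] at h2
    by_cases hy1 : y = l.getD i 0 <;> by_cases hy2 : y = l.getD j 0 <;>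
      simp [hy1, hy2] at h1 h2 ⊢ <;> omega

-- the key swap step shared by both sift directions:
-- (h with pos := h[q]) then q := x  is a permutation of  h with pos := x
theorem perm_set_step (h : List Int) (pos q : Nat) (x : Int)
    (hpos : pos < h.length) (hq : q < h.length) (hne : q ≠ pos) :
    ((h.set pos (h.getD q 0)).set q x).Perm (h.set pos x) := by
  have hswap := perm_set_swap (h.set pos x) pos q (by simpa using hpos) (by simpa using hq)
  rw [getD_set_ne (fun he => hne he.symm), getD_set_self hpos, List.set_set] at hswap
  exact hswap

theorem siftdown_spec (fuel : Nat) : ∀ (h : List Int) (pos : Nat) (item : Int),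
    pos ≤ fuel →
    pos < h.length →
    (∀ i, 0 < i → i < h.length → i ≠ pos → (i - 1) / 2 ≠ pos →
      h.getD ((i - 1) / 2) 0 ≤ h.getD i 0) →
    (∀ i, 0 < i → i < h.length → (i - 1) / 2 = pos → item ≤ h.getD i 0) →
    (∀ i, 0 < i → i < h.length → (i - 1) / 2 = pos → 0 < pos →
      h.getD ((pos - 1) / 2) 0 ≤ h.getD i 0) →
    HeapInv (siftdownAux fuel h 0 pos item) ∧
      (siftdownAux fuel h 0 pos item).Perm (h.set pos item) := by
  induction fuel with
  | zero =>
    -- fuel 0: pos ≤ 0, so pos = 0 and this is the loop's exit at the root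
    intro h pos item hf hp A1 A2 A3
    have hpos0 : pos = 0 := by omega
    subst hpos0
    simp only [siftdownAux]
    refine ⟨?_, List.Perm.refl _⟩
    intro i hi0 hilen
    simp only [List.length_set] at hilen
    rcases eq_or_ne ((i - 1) / 2) 0 with hpe | hpne
    · rw [hpe, getD_set_self hp, getD_set_ne (by omega : (0:Nat) ≠ i)]
      exact A2 i hi0 hilen hpe
    · rw [getD_set_ne (by omega : (0:Nat) ≠ i), getD_set_ne (fun he => hpne he.symm)]
      exact A1 i hi0 hilen (by omega) hpne
  | succ fuel ihf =>
    intro h pos item hf hp A1 A2 A3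
    simp only [siftdownAux]
    by_cases hgt : 0 < pos
    · rw [if_pos hgt]
      set parentpos := (pos - 1) / 2 with hd
      set parentv := h.getD parentpos 0 with hv
      have hpp : parentpos < pos := by omega
      have hplt : parentpos < h.length := lt_trans hpp hp
      by_cases hlt : item < parentv
      · -- newitem < parent: the parent moves down into pos, recurse at parentpos
        rw [if_pos hlt]
        have hset : ∀ j, j ≠ pos → (h.set pos parentv).getD j 0 = h.getD j 0 :=
          fun j hj => getD_set_ne (fun he => hj he.symm) _
        have hsetpos : (h.set pos parentv).getD pos 0 = parentv := getD_set_self hp _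
        obtain ⟨hInv, hPerm⟩ := ihf (h.set pos parentv) parentpos item (by omega)
          (by simpa using hplt)
          (by -- A1 at parentpos
            intro i hi0 hilen hine hipar
            simp only [List.length_set] at hilen
            rcases eq_or_ne i pos with rfl | hip
            · rw [hsetpos]
              have hpar : (i - 1) / 2 = parentpos := hd.symm
              rw [hpar, hset parentpos (Nat.ne_of_lt hpp), hv]
            · rw [hset i hip]
              rcases eq_or_ne ((i - 1) / 2) pos with hpe | hpne
              · rw [hpe, hsetpos, hv, hd]
                exact A3 i hi0 hilen hpe hgt
              · rw [hset _ hpne]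
                exact A1 i hi0 hilen hip hpne)
          (by -- A2 at parentpos: the hole's children vs item
            intro i hi0 hilen hipar
            simp only [List.length_set] at hilen
            rcases eq_or_ne i pos with rfl | hip
            · rw [hsetpos]; exact le_of_lt hlt
            · rw [hset i hip]
              have hstep : h.getD ((i - 1) / 2) 0 ≤ h.getD i 0 :=
                A1 i hi0 hilen hip (by omega)
              calc item ≤ parentv := le_of_lt hlt
                _ = h.getD ((i - 1) / 2) 0 := by rw [hv, hipar]
                _ ≤ h.getD i 0 := hstep)
          (by -- A3 at parentpos: grandparent bound
            intro i hi0 hilen hipar hpp0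
            simp only [List.length_set] at hilen
            have hgpne : (parentpos - 1) / 2 ≠ pos := by omega
            rw [hset _ hgpne]
            have hgp : h.getD ((parentpos - 1) / 2) 0 ≤ h.getD parentpos 0 :=
              A1 parentpos hpp0 hplt (Nat.ne_of_lt hpp) (by omega)
            rcases eq_or_ne i pos with rfl | hip
            · rw [hsetpos, hv]; exact hgp
            · rw [hset i hip]
              have hstep : h.getD ((i - 1) / 2) 0 ≤ h.getD i 0 :=
                A1 i hi0 hilen hip (by omega)
              calc h.getD ((parentpos - 1) / 2) 0 ≤ h.getD parentpos 0 := hgp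
                _ = h.getD ((i - 1) / 2) 0 := by rw [hipar]
                _ ≤ h.getD i 0 := hstep)
        refine ⟨hInv, hPerm.trans ?_⟩
        rw [hv]
        exact perm_set_step h pos parentpos item hp hplt (Nat.ne_of_lt hpp)
      · -- exit: item ≥ parent; placing item at pos yields a heap
        rw [if_neg hlt]
        refine ⟨?_, List.Perm.refl _⟩
        intro i hi0 hilen
        simp only [List.length_set] at hilen
        rcases eq_or_ne i pos with hip | hip
        · subst hip
          have hpar : (i - 1) / 2 = parentpos := hd.symm
          rw [getD_set_self hp, hpar, getD_set_ne (Ne.symm (Nat.ne_of_lt hpp))]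
          rw [← hv]; exact not_lt.mp hlt
        · rw [getD_set_ne (fun he => hip he.symm)]
          rcases eq_or_ne ((i - 1) / 2) pos with hpe | hpne
          · rw [hpe, getD_set_self hp]; exact A2 i hi0 hilen hpe
          · rw [getD_set_ne (fun he => hpne he.symm)]; exact A1 i hi0 hilen hip hpne
    · -- exit: pos = startpos = 0
      rw [if_neg hgt]
      have hpos0 : pos = 0 := by omega
      subst hpos0
      refine ⟨?_, List.Perm.refl _⟩
      intro i hi0 hilen
      simp only [List.length_set] at hilen
      rcases eq_or_ne ((i - 1) / 2) 0 with hpe | hpne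
      · rw [hpe, getD_set_self hp, getD_set_ne (by omega : (0:Nat) ≠ i)]
        exact A2 i hi0 hilen hpe
      · rw [getD_set_ne (by omega : (0:Nat) ≠ i), getD_set_ne (fun he => hpne he.symm)]
        exact A1 i hi0 hilen (by omega) hpne

theorem heappush_spec (h : List Int) (x : Int) (hInv : HeapInv h) :
    HeapInv (heappush h x) ∧ (heappush h x).Perm (x :: h) := by
  have hlen : h.length < (h ++ [x]).length := by simp
  have hget : ∀ j, j < h.length → (h ++ [x]).getD j 0 = h.getD j 0 := by
    intro j hj
    simp [List.getD_eq_getElem?_getD, List.getElem?_append_left hj]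
  obtain ⟨h1, h2⟩ := siftdown_spec h.length (h ++ [x]) h.length x le_rfl hlen
    (by
      intro i hi0 hilen hine _
      simp only [List.length_append, List.length_singleton] at hilen
      have hi : i < h.length := by omega
      rw [hget i hi, hget _ (by omega)]
      exact hInv i hi0 hi)
    (by intro i hi0 hilen hipar; simp at hilen; omega)
    (by intro i hi0 hilen hipar _; simp at hilen; omega)
  refine ⟨h1, h2.trans ?_⟩
  have hset : ∀ (l : List Int), (l ++ [x]).set l.length x = l ++ [x] := by
    intro l
    induction l with
    | nil => rfl
    | cons a t iht => simpa using iht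
  rw [hset]
  exact List.perm_append_singleton x h

theorem siftupLoop_spec (fuel : Nat) (endpos : Nat) : ∀ (h : List Int) (pos childpos : Nat),
    endpos - childpos ≤ fuel →
    endpos = h.length →
    pos < h.length → childpos = 2 * pos + 1 →
    (∀ i, 0 < i → i < h.length → i ≠ pos → (i - 1) / 2 ≠ pos →
      h.getD ((i - 1) / 2) 0 ≤ h.getD i 0) →
    (∀ i, 0 < i → i < h.length → (i - 1) / 2 = pos → 0 < pos →
      h.getD ((pos - 1) / 2) 0 ≤ h.getD i 0) →
    (siftupLoop fuel h pos childpos endpos).2 < (siftupLoop fuel h pos childpos endpos).1.length ∧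
    2 * (siftupLoop fuel h pos childpos endpos).2 + 1 ≥ endpos ∧
    (∀ i, 0 < i → i < (siftupLoop fuel h pos childpos endpos).1.length →
      i ≠ (siftupLoop fuel h pos childpos endpos).2 →
      (i - 1) / 2 ≠ (siftupLoop fuel h pos childpos endpos).2 →
      (siftupLoop fuel h pos childpos endpos).1.getD ((i - 1) / 2) 0
        ≤ (siftupLoop fuel h pos childpos endpos).1.getD i 0) ∧
    (∀ i, 0 < i → i < (siftupLoop fuel h pos childpos endpos).1.length →
      (i - 1) / 2 = (siftupLoop fuel h pos childpos endpos).2 →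
      0 < (siftupLoop fuel h pos childpos endpos).2 →
      (siftupLoop fuel h pos childpos endpos).1.getD
        (((siftupLoop fuel h pos childpos endpos).2 - 1) / 2) 0
        ≤ (siftupLoop fuel h pos childpos endpos).1.getD i 0) ∧
    (∀ x, ((siftupLoop fuel h pos childpos endpos).1.set
        (siftupLoop fuel h pos childpos endpos).2 x).Perm (h.set pos x)) := by
  induction fuel with
  | zero =>
    -- fuel 0: endpos ≤ childpos, the loop's exit
    intro h pos childpos hf hend hpos hc C1 C2
    simp only [siftupLoop]
    exact ⟨hpos, by omega, C1, C2, fun x => List.Perm.refl _⟩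
  | succ fuel ihf =>
    intro h pos childpos hf hend hpos hc C1 C2
    simp only [siftupLoop]
    by_cases hlt : childpos < endpos
    · rw [if_pos hlt]
      set childpos' := if childpos + 1 < endpos ∧ ¬ (h.getD childpos 0 < h.getD (childpos + 1) 0)
          then childpos + 1 else childpos with hcp
      have hsplit : (childpos' = childpos + 1 ∧ childpos + 1 < endpos ∧
          h.getD (childpos + 1) 0 ≤ h.getD childpos 0)
          ∨ (childpos' = childpos ∧ (childpos + 1 < endpos → h.getD childpos 0 < h.getD (childpos + 1) 0)) := by
        rw [hcp]; split
        · rename_i hcond; exact Or.inl ⟨rfl, hcond.1, not_lt.mp hcond.2⟩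
        · rename_i hcond
          refine Or.inr ⟨rfl, fun hr => ?_⟩
          by_contra hnl
          exact hcond ⟨hr, hnl⟩
      have hrange : childpos ≤ childpos' ∧ childpos' < endpos := by
        rcases hsplit with ⟨he, hr, _⟩ | ⟨he, _⟩ <;> omega
      -- the chosen child is the smaller of pos's children
      have hsmall : ∀ j, 0 < j → j < endpos → (j - 1) / 2 = pos → j ≠ childpos' →
          h.getD childpos' 0 ≤ h.getD j 0 := by
        intro j hj0 hje hjp hjc
        have hj : j = childpos ∨ j = childpos + 1 := by omega
        rcases hsplit with ⟨he, _, hle⟩ | ⟨he, hlt2⟩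
        · have : j = childpos := by omega
          rw [he, this]; exact hle
        · have : j = childpos + 1 := by omega
          rw [he, this]
          exact le_of_lt (hlt2 (by omega))
      have hposlt : pos < h.length := hpos
      have hclen : childpos' < h.length := by omega
      have hcpos : pos < childpos' := by omega
      have hset : ∀ j, j ≠ pos → (h.set pos (h.getD childpos' 0)).getD j 0 = h.getD j 0 :=
        fun j hj => getD_set_ne (fun he => hj he.symm) _
      have hsetpos : (h.set pos (h.getD childpos' 0)).getD pos 0 = h.getD childpos' 0 :=
        getD_set_self hposlt _
      obtain ⟨ih1, ih2, ih3, ih4, ih5⟩ := ihf (h.set pos (h.getD childpos' 0)) childpos'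
        (2 * childpos' + 1) (by omega) (by simpa using hend) (by simpa using hclen) rfl
        (by -- C1 at childpos'
          intro i hi0 hilen hine hipar
          simp only [List.length_set] at hilen
          rcases eq_or_ne i pos with hip | hip
          · subst hip
            rw [hsetpos, hset _ (by omega : ¬ (i - 1) / 2 = i)]
            exact C2 childpos' (by omega) hclen (by omega) hi0
          · rw [hset i hip]
            rcases eq_or_ne ((i - 1) / 2) pos with hpe | hpne
            · rw [hpe, hsetpos]
              exact hsmall i hi0 (by omega) hpe hine
            · rw [hset _ hpne]
              exact C1 i hi0 hilen hip hpne)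
        (by -- C2 at childpos'
          intro i hi0 hilen hipar _
          simp only [List.length_set] at hilen
          have hpc : (childpos' - 1) / 2 = pos := by omega
          have hipos : i ≠ pos := by omega
          rw [hpc, hsetpos, hset i hipos]
          have hstep := C1 i hi0 hilen hipos (by omega)
          rwa [hipar] at hstep)
      refine ⟨ih1, ih2, ih3, ih4, fun x => (ih5 x).trans ?_⟩
      exact perm_set_step h pos childpos' x hposlt hclen (by omega)
    · rw [if_neg hlt]
      exact ⟨hpos, by omega, C1, C2, fun x => List.Perm.refl _⟩

theorem siftup_spec (g : List Int) (hne : g ≠ [])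
    (B1 : ∀ i, 0 < i → i < g.length → (i - 1) / 2 ≠ 0 →
      g.getD ((i - 1) / 2) 0 ≤ g.getD i 0) :
    HeapInv (siftup g 0) ∧ (siftup g 0).Perm g := by
  have hlen : 0 < g.length := List.length_pos_of_ne_nil hne
  obtain ⟨h1, h2, h3, h4, h5⟩ := siftupLoop_spec g.length g.length g 0 (2 * 0 + 1)
    (by omega) rfl hlen rfl
    (fun i hi0 hil _ hipar => B1 i hi0 hil hipar)
    (fun i _ _ _ h0 => absurd h0 (by omega))
  have hr1len : (siftupLoop g.length g 0 (2 * 0 + 1) g.length).1.length = g.length :=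
    siftupLoop_length g.length g 0 (2 * 0 + 1) g.length
  obtain ⟨hd1, hd2⟩ := siftdown_spec (siftupLoop g.length g 0 (2 * 0 + 1) g.length).2
    (siftupLoop g.length g 0 (2 * 0 + 1) g.length).1
    (siftupLoop g.length g 0 (2 * 0 + 1) g.length).2 (g.getD 0 0) le_rfl h1 h3
    (fun i hi0 hilen hipar => by rw [hr1len] at hilen; omega)
    h4
  constructor
  · exact hd1
  · refine hd2.trans ?_
    refine (h5 (g.getD 0 0)).trans ?_
    rw [set_getD_self hlen]

theorem root_le (h : List Int) (hInv : HeapInv h) :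
    ∀ i, i < h.length → h.getD 0 0 ≤ h.getD i 0 := by
  intro i
  induction i using Nat.strong_induction_on with
  | _ i ih =>
    intro hi
    rcases Nat.eq_zero_or_pos i with rfl | hi0
    · exact le_refl _
    · calc h.getD 0 0 ≤ h.getD ((i - 1) / 2) 0 := ih ((i - 1) / 2) (by omega) (by omega)
        _ ≤ h.getD i 0 := hInv i hi0 hi

theorem root_le_mem (h : List Int) (hInv : HeapInv h) :
    ∀ y ∈ h, h.getD 0 0 ≤ y := by
  intro y hy
  obtain ⟨i, hi, rfl⟩ := List.getElem_of_mem hy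
  have : h.getD i 0 = h[i] := by simp [List.getD_eq_getElem?_getD, List.getElem?_eq_getElem hi]
  rw [← this]
  exact root_le h hInv i hi

theorem root_mem (h : List Int) (hne : h ≠ []) : h.getD 0 0 ∈ h := by
  cases h with
  | nil => simp at hne
  | cons a t => simp [List.getD_cons_zero]

theorem heappop_spec (h : List Int) (hne : h ≠ []) (hInv : HeapInv h) :
    (heappop h).1 = h.getD 0 0 ∧ HeapInv (heappop h).2 ∧
      h.Perm ((heappop h).1 :: (heappop h).2) := by
  induction h using List.reverseRecOn with
  | nil => simp at hne
  | append_singleton ys y _ih =>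
    by_cases hys : ys = []
    · subst hys
      simp only [List.nil_append]
      have hpop1 : heappop [y] = (y, []) := rfl
      rw [hpop1]
      refine ⟨rfl, ?_, List.Perm.refl _⟩
      intro i hi0 hilen
      simp at hilen
    · obtain ⟨a, t, rfl⟩ : ∃ a t, ys = a :: t := by
        cases ys with
        | nil => simp at hys
        | cons a t => exact ⟨a, t, rfl⟩
      rw [List.cons_append] at hInv ⊢
      have hgl : (a :: (t ++ [y])).getLast? = some y := by
        rw [← List.cons_append]; exact List.getLast?_concat
      have hdl : (a :: (t ++ [y])).dropLast = a :: t := by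
        rw [← List.cons_append]; exact List.dropLast_concat
      have hpop : heappop (a :: (t ++ [y])) = (a, siftup ((a :: t).set 0 y) 0) := by
        simp [heappop, hgl, hdl]
      have hget : ∀ i, i < (a :: t).length →
          (a :: (t ++ [y])).getD i 0 = (a :: t).getD i 0 := by
        intro i hi
        cases i with
        | zero => rfl
        | succ j =>
          have hj : j < t.length := by simpa using hi
          simp [List.getD_eq_getElem?_getD, List.getElem?_append_left hj]
      have hInvRest : ∀ i, 0 < i → i < (a :: t).length →
          (a :: t).getD ((i - 1) / 2) 0 ≤ (a :: t).getD i 0 := by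
        intro i hi0 hi
        have hi' : i < t.length + 1 := by simpa using hi
        have hilen : i < (a :: (t ++ [y])).length := by simp; omega
        have := hInv i hi0 hilen
        rwa [hget i hi, hget _ (by simp only [List.length_cons]; omega)] at this
      have hB1 : ∀ i, 0 < i → i < ((a :: t).set 0 y).length → (i - 1) / 2 ≠ 0 →
          ((a :: t).set 0 y).getD ((i - 1) / 2) 0 ≤ ((a :: t).set 0 y).getD i 0 := by
        intro i hi0 hilen hipar
        simp only [List.length_set] at hilen
        rw [getD_set_ne (by omega : (0:Nat) ≠ i), getD_set_ne (fun he => hipar he.symm)]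
        exact hInvRest i hi0 hilen
      obtain ⟨hsI, hsP⟩ := siftup_spec ((a :: t).set 0 y) (by simp) hB1
      rw [hpop]
      refine ⟨?_, hsI, ?_⟩
      · simp
      · have hsP' : (siftup ((a :: t).set 0 y) 0).Perm (y :: t) := hsP
        have hstep : (a :: (t ++ [y])).Perm (a :: y :: t) := (List.perm_append_singleton y t).cons a
        exact hstep.trans (hsP'.symm.cons a)

-- in any permutation L of a heap h, min(L) is the heap's root
theorem min_eq_root (h L : List Int) (hne : h ≠ []) (hInv : HeapInv h) (hP : h.Perm L) :
    L.min? = some (h.getD 0 0) := by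
  rw [List.min?_eq_some_iff]
  exact ⟨hP.mem_iff.mp (root_mem h hne),
    fun b hb => root_le_mem h hInv b (hP.mem_iff.mpr hb)⟩

-- erasing the head value from a permutation of x :: t leaves a permutation of t
theorem perm_erase_head (L : List Int) (x : Int) (t : List Int) (hP : L.Perm (x :: t)) :
    (L.erase x).Perm t := by
  have := hP.erase x
  rw [List.erase_cons_head] at this
  exact this

-- the common greedy loop: A's heap loop equals B's min-scan loop on any permutation of the
-- heap, for any sufficient fuels on the two sides
theorem loop_eq (fa : Nat) : ∀ (fb : Nat) (h L : List Int) (k ans : Int),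
    h.length ≤ fa → h.length ≤ fb → h ≠ [] → HeapInv h → h.Perm L →
    loopA fa h k ans = loopScan fb L k ans := by
  induction fa with
  | zero =>
    intro fb h L k ans hfa hfb hne hInv hP
    exact absurd (List.length_eq_zero_iff.mp (by omega)) hne
  | succ fa ihn =>
    intro fb h L k ans hfa hfb hne hInv hP
    have hlen0 : 0 < h.length := List.length_pos_of_ne_nil hne
    obtain ⟨fb', rfl⟩ : ∃ fb', fb = fb' + 1 := ⟨fb - 1, by omega⟩
    have hmin : L.min? = some (h.getD 0 0) := min_eq_root h L hne hInv hP
    simp only [loopA, loopScan, hmin]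
    by_cases hxk : h.getD 0 0 < k
    · rw [if_pos hxk, if_pos hxk]
      by_cases hlen2 : 1 < h.length
      · -- a mixing step on both sides
        rw [if_pos hlen2, if_neg (by have := hP.length_eq; omega : ¬ L.length < 2)]
        obtain ⟨hp1, hI1, hPm1⟩ := heappop_spec h hne hInv
        -- after removing min(L) = root from L, the remaining multiset is (heappop h).2's
        have hP1 : ((heappop h).2).Perm (L.erase (h.getD 0 0)) :=
          (perm_erase_head L (h.getD 0 0) (heappop h).2 (hP.symm.trans (hp1 ▸ hPm1))).symm
        have hne1 : (heappop h).2 ≠ [] := by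
          intro he
          have := hPm1.length_eq
          rw [he] at this
          simp at this
          omega
        obtain ⟨hp2, hI2, hPm2⟩ := heappop_spec (heappop h).2 hne1 hI1
        have hmin2 : (L.erase (h.getD 0 0)).min? = some ((heappop h).2.getD 0 0) :=
          min_eq_root (heappop h).2 (L.erase (h.getD 0 0)) hne1 hI1 hP1
        rw [hmin2]
        have hP2 : ((heappop (heappop h).2).2).Perm
            ((L.erase (h.getD 0 0)).erase ((heappop h).2.getD 0 0)) :=
          (perm_erase_head (L.erase (h.getD 0 0)) ((heappop h).2.getD 0 0)
            (heappop (heappop h).2).2 (hP1.symm.trans (hp2 ▸ hPm2))).symm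
        obtain ⟨hI3, hPm3⟩ :=
          heappush_spec (heappop (heappop h).2).2 ((heappop h).1 + (heappop (heappop h).2).1 * 2) hI2
        have hval : (heappop h).1 + (heappop (heappop h).2).1 * 2
            = h.getD 0 0 + 2 * ((heappop h).2.getD 0 0) := by
          rw [hp1, hp2]; ring
        have hP3 : (heappush (heappop (heappop h).2).2
            ((heappop h).1 + (heappop (heappop h).2).1 * 2)).Perm
            (((L.erase (h.getD 0 0)).erase ((heappop h).2.getD 0 0))
              ++ [h.getD 0 0 + 2 * ((heappop h).2.getD 0 0)]) := by
          refine hPm3.trans ?_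
          rw [hval]
          exact (hP2.cons _).trans (List.perm_append_singleton _ _).symm
        have hlen3 : (heappush (heappop (heappop h).2).2
            ((heappop h).1 + (heappop (heappop h).2).1 * 2)).length = h.length - 1 := by
          rw [heappush_length]
          have e1 : h.length = (heappop h).2.length + 1 := by simpa using hPm1.length_eq
          have e2 : (heappop h).2.length = (heappop (heappop h).2).2.length + 1 := by
            simpa using hPm2.length_eq
          omega
        have hne3 : (heappush (heappop (heappop h).2).2
            ((heappop h).1 + (heappop (heappop h).2).1 * 2)) ≠ [] := by
          intro he
          have := congrArg List.length he
          rw [hlen3] at this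
          simp at this
          omega
        show loopA fa (heappush (heappop (heappop h).2).2
            ((heappop h).1 + (heappop (heappop h).2).1 * 2)) k (ans + 1)
          = loopScan fb' (((L.erase (h.getD 0 0)).erase ((heappop h).2.getD 0 0))
              ++ [h.getD 0 0 + 2 * ((heappop h).2.getD 0 0)]) k (ans + 1)
        exact ihn fb' _ _ k (ans + 1) (by omega) (by omega) hne3 hI3 hP3
      · -- a single element below k: both return -1
        have hL2 : L.length < 2 := by
          have := hP.length_eq
          omega
        rw [if_neg hlen2, if_pos hL2]
    · rw [if_neg hxk, if_neg hxk]

theorem build_spec (l : List Int) : ∀ acc, HeapInv acc →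
    HeapInv (l.foldl (fun h i => heappush h i) acc) ∧
      (l.foldl (fun h i => heappush h i) acc).Perm (acc ++ l) := by
  induction l with
  | nil =>
    intro acc hInv
    simp only [List.foldl_nil, List.append_nil]
    exact ⟨hInv, List.Perm.refl _⟩
  | cons x t ih =>
    intro acc hInv
    obtain ⟨hI, hP⟩ := heappush_spec acc x hInv
    obtain ⟨hI2, hP2⟩ := ih (heappush acc x) hI
    refine ⟨hI2, hP2.trans ?_⟩
    have h3 : ((x :: acc) ++ t).Perm (acc ++ x :: t) := by
      simpa using (List.perm_middle (a := x) (l₁ := acc) (l₂ := t)).symm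
    exact (hP.append_right t).trans h3

-- ===== VERDICT (by name: the statement is the Claim_ definition above) =====
theorem solution_spec : Claim_equal_solution := by
  intro scoville k _hdom hpre
  unfold Spec_solution solution solution_alt
  obtain ⟨hI, hP⟩ := build_spec scoville [] (by intro i h1 h2; simp at h2)
  simp only [List.nil_append] at hP
  exact loop_eq (scoville.foldl (fun h i => heappush h i) []).length scoville.length _ _ k 0
    le_rfl (le_of_eq hP.length_eq)
    (by
      intro hnil
      rw [hnil] at hP
      exact hpre (hP.symm.eq_nil ▸ rfl))
    hI hP
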